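-- pv_equiv track=rewrite | github.com/bssrdf/pyleet | CountNumberofTexts.py | countTexts2
-- ===== SOURCE A (Python) =====
-- from itertools import groupby
--
-- def countTexts2(pressedKeys: str) -> int:
--     mod = 10**9 + 7
--     def count(c, n):
--         dp = [0]*(n+1)
--         dp[0] = 1
--         for i in range(1,n+1):
--             dp[i] += dp[i-1]
--             if i > 1: dp[i] += dp[i-2]
--             if i > 2: dp[i] += dp[i-3]
--             if (c == '7' or c == '9') and i > 3:
--                 dp[i] += dp[i-4]
--         return dp[n]
--
--     ans = 1
--     for k, g in groupby(pressedKeys):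
--         ans = ans * count(k, len(list(g))) % mod
--     return ans
-- ===== SOURCE B (Python) =====
-- def countTexts2(pressedKeys: str) -> int:
--     MOD = 10**9 + 7
--     # single global DP over the whole string, O(1) state window; equality
--     # guards on the last chars block combinations across run boundaries
--     d0, d1, d2, d3 = 0, 0, 0, 1   # dp[i-3], dp[i-2], dp[i-1], dp[i]
--     p1 = p2 = p3 = None           # last three characters seen
--     for ch in pressedKeys:
--         v = d3
--         if ch == p1:
--             v += d2
--             if ch == p2:
--                 v += d1
--                 if ch == p3 and (ch == '7' or ch == '9'):
--                     v += d0
--         d0, d1, d2, d3 = d1, d2, d3, v % MOD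
--         p1, p2, p3 = ch, p1, p2
--     return d3 % MOD
-- ===== Notes on version B (the rewrite author's own statement) =====
-- stated objective: faster
-- what changed: Replaces groupby + per-run array DP + modular multiplication of per-run counts by a single left-to-right DP over the whole string with an O(1) sliding window of four dp values and the last three characters; equality guards block combinations across run boundaries, so no grouping, per-run list/array allocation or multiplication of subresults is needed.
import Mathlib
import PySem

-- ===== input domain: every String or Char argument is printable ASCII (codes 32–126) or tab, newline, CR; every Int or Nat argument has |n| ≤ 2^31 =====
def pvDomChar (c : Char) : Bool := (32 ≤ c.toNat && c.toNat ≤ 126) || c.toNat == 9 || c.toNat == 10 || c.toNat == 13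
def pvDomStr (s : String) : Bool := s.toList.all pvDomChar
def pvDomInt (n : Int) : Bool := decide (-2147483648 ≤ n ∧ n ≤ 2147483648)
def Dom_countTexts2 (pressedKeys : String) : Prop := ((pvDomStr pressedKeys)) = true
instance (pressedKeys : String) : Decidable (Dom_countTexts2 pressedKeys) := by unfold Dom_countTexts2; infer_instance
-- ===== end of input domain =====

-- B replaces groupby + per-run DP + modular product by one global sliding-window DP over the string (alternative decomposition, same cost).

-- ===== PORT A =====
def pvMod : Int := 1000000007

-- one iteration of count's inner loop: dp kept as a reversed list, head = dp[i-1]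
def pvCStep (c : Char) (dp : List Int) (i : Nat) : List Int :=
  let v := dp.getD 0 0
  let v := if i > 1 then v + dp.getD 1 0 else v
  let v := if i > 2 then v + dp.getD 2 0 else v
  let v := if (c = '7' ∨ c = '9') ∧ i > 3 then v + dp.getD 3 0 else v
  v :: dp

-- count(c, n): dp[0] = 1, loop i = 1..n, return dp[n]
def pvCount (c : Char) (n : Nat) : Int :=
  ((List.range' 1 n).foldl (pvCStep c) [1]).headD 0

-- itertools.groupby with len(list(g)): run-length encoding, left to right
def pvGoRuns (c : Char) (n : Nat) (l : List Char) : List (Char × Nat) :=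
  match l with
  | [] => [(c, n)]
  | x :: xs => if x = c then pvGoRuns c (n + 1) xs else (c, n) :: pvGoRuns x 1 xs

def pvRuns (l : List Char) : List (Char × Nat) :=
  match l with
  | [] => []
  | x :: xs => pvGoRuns x 1 xs

def countTexts2 (pressedKeys : String) : Int :=
  (pvRuns pressedKeys.toList).foldl (fun a r => a * pvCount r.1 r.2 % pvMod) 1

-- ===== PORT B =====
-- state: ((dp[i-3], dp[i-2], dp[i-1], dp[i]), (last char, 2nd last, 3rd last))
def pvBState : Type := (Int × Int × Int × Int) × (Option Char × Option Char × Option Char)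

def pvBStep (st : pvBState) (ch : Char) : pvBState :=
  let v := st.1.2.2.2 +
    (if some ch = st.2.1 then st.1.2.2.1 +
      (if some ch = st.2.2.1 then st.1.2.1 +
        (if some ch = st.2.2.2 ∧ (ch = '7' ∨ ch = '9') then st.1.1 else 0)
      else 0)
    else 0)
  ((st.1.2.1, st.1.2.2.1, st.1.2.2.2, v % pvMod), (some ch, st.2.1, st.2.2.1))

def countTexts2_alt (pressedKeys : String) : Int :=
  (pressedKeys.toList.foldl pvBStep ((0, 0, 0, 1), (none, none, none))).1.2.2.2 % pvMod

-- ===== PRECONDITION & SPEC =====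
def Spec_countTexts2 (pressedKeys : String) (out : Int) : Prop := out = countTexts2_alt pressedKeys
instance (pressedKeys : String) (out : Int) : Decidable (Spec_countTexts2 pressedKeys out) := by unfold Spec_countTexts2; infer_instance

-- ===== CLAIM (what is proved, stated in full; the proofs are below) =====
def Claim_equal_countTexts2 : Prop := ∀ (pressedKeys : String), Dom_countTexts2 pressedKeys → Spec_countTexts2 pressedKeys (countTexts2 pressedKeys)

-- ===== LEMMAS AND PROOFS =====

-- the per-run count, as a pure recurrence
def pvK (b : Bool) : Nat → Int
  | 0 => 1
  | 1 => 1
  | 2 => 2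
  | 3 => 4
  | n + 4 => pvK b (n + 3) + pvK b (n + 2) + pvK b (n + 1) + (if b then pvK b n else 0)

-- reversed list of pvK values [k n, k (n-1), …, k 0]
def pvRevK (b : Bool) : Nat → List Int
  | 0 => [1]
  | n + 1 => pvK b (n + 1) :: pvRevK b n

theorem pvRevK_headD (b : Bool) (n : Nat) : (pvRevK b n).headD 0 = pvK b n := by
  cases n <;> simp [pvRevK, pvK]

theorem pvRevK_getD1 (b : Bool) (n : Nat) : (pvRevK b (n + 1)).getD 1 0 = pvK b n := by
  cases n <;> simp [pvRevK, pvK]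

theorem pvRevK_getD2 (b : Bool) (n : Nat) : (pvRevK b (n + 2)).getD 2 0 = pvK b n := by
  cases n <;> simp [pvRevK, pvK]

theorem pvRevK_getD3 (b : Bool) (n : Nat) : (pvRevK b (n + 3)).getD 3 0 = pvK b n := by
  cases n <;> simp [pvRevK, pvK]

theorem pvCount_loop (c : Char) (n : Nat) :
    (List.range' 1 n).foldl (pvCStep c) [1] = pvRevK (decide (c = '7' ∨ c = '9')) n := by
  induction n with
  | zero => simp [pvRevK]
  | succ n ih =>
    rw [List.range'_1_concat, List.foldl_append, ih]
    set b := decide (c = '7' ∨ c = '9') with hb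
    match n with
    | 0 => simp [pvCStep, pvRevK, pvK]
    | 1 => simp [pvCStep, pvRevK, pvK]
    | 2 => simp [pvCStep, pvRevK, pvK]
    | m + 3 =>
      simp only [List.foldl_cons, List.foldl_nil, pvCStep, pvRevK_getD1, pvRevK_getD2,
        pvRevK_getD3]
      have heq : pvRevK b (m + 3 + 1) = pvK b (m + 4) :: pvRevK b (m + 3) := rfl
      rw [heq]
      have hd : (pvRevK b (m + 3)).getD 0 0 = pvK b (m + 3) := by
        simpa using pvRevK_headD b (m + 3)
      rw [hd]
      by_cases hc : c = '7' ∨ c = '9'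
      · have hbt : b = true := by simp [hb, hc]
        simp [hc, hbt, pvK, show (2:Nat) < 1 + (m + 3) from by omega,
          show (3:Nat) < 1 + (m + 3) from by omega]
      · have hbt : b = false := by simp [hb, hc]
        simp [hc, hbt, pvK, show (2:Nat) < 1 + (m + 3) from by omega]
  
theorem pvCount_eq (c : Char) (n : Nat) :
    pvCount c n = pvK (decide (c = '7' ∨ c = '9')) n := by
  rw [pvCount, pvCount_loop, pvRevK_headD]

-- product of per-run counts
def pvProdK (rs : List (Char × Nat)) : Int :=
  (rs.map (fun r => pvK (decide (r.1 = '7' ∨ r.1 = '9')) r.2)).prod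

-- unreduced B step (no % pvMod), used as proof intermediary
def pvBStepU (st : pvBState) (ch : Char) : pvBState :=
  let v := st.1.2.2.2 +
    (if some ch = st.2.1 then st.1.2.2.1 +
      (if some ch = st.2.2.1 then st.1.2.1 +
        (if some ch = st.2.2.2 ∧ (ch = '7' ∨ ch = '9') then st.1.1 else 0)
      else 0)
    else 0)
  ((st.1.2.1, st.1.2.2.1, st.1.2.2.2, v), (some ch, st.2.1, st.2.2.1))

def pvWEq (w w' : Int × Int × Int × Int) : Prop :=
  w.1 % pvMod = w'.1 % pvMod ∧ w.2.1 % pvMod = w'.2.1 % pvMod ∧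
  w.2.2.1 % pvMod = w'.2.2.1 % pvMod ∧ w.2.2.2 % pvMod = w'.2.2.2 % pvMod

theorem pvAddCong {a a' b b' : Int} (h1 : a % pvMod = a' % pvMod)
    (h2 : b % pvMod = b' % pvMod) : (a + b) % pvMod = (a' + b') % pvMod := by
  rw [Int.add_emod, h1, h2, ← Int.add_emod]

theorem pvBcong (l : List Char) :
    ∀ (w w' : Int × Int × Int × Int) (pv : Option Char × Option Char × Option Char),
      pvWEq w w' →
      (l.foldl pvBStep (w, pv)).2 = (l.foldl pvBStepU (w', pv)).2 ∧
      pvWEq (l.foldl pvBStep (w, pv)).1 (l.foldl pvBStepU (w', pv)).1 := by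
  induction l with
  | nil => intro w w' pv hw; exact ⟨rfl, hw⟩
  | cons c l ih =>
    intro w w' pv hw
    obtain ⟨a0, a1, a2, a3⟩ := w
    obtain ⟨b0, b1, b2, b3⟩ := w'
    obtain ⟨p1, p2, p3⟩ := pv
    obtain ⟨h0, h1, h2, h3⟩ := hw
    simp only [List.foldl_cons, pvBStep, pvBStepU]
    apply ih
    refine ⟨h1, h2, h3, ?_⟩
    simp only
    rw [Int.emod_emod_of_dvd _ dvd_rfl]
    split_ifs with hA hB hC
    · exact pvAddCong h3 (pvAddCong h2 (pvAddCong h1 h0))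
    · exact pvAddCong h3 (pvAddCong h2 (pvAddCong h1 rfl))
    · exact pvAddCong h3 (pvAddCong h2 rfl)
    · exact pvAddCong h3 rfl

-- within-run behaviour of the unreduced step, from step 3 on
theorem pvRun3 (c : Char) (j : Nat) :
    ∀ a b d e : Int, ∀ p1 p2 p3 : Option Char, p1 ≠ some c →
      (List.replicate (3 + j) c).foldl pvBStepU ((a, b, d, e), (p1, p2, p3)) =
        (let bb := decide (c = '7' ∨ c = '9');
         ((e * pvK bb j, e * pvK bb (j + 1), e * pvK bb (j + 2), e * pvK bb (j + 3)),
          (some c, some c, some c))) := by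
  induction j with
  | zero =>
    intro a b d e p1 p2 p3 hp
    have hne : ¬ (some c = p1) := fun h => hp h.symm
    simp [List.replicate, pvBStepU, hne, pvK,
      show e + e = e * 2 from by ring, show e * 2 + e * 2 = e * 4 from by ring]
  | succ j ih =>
    intro a b d e p1 p2 p3 hp
    have : (3 + (j + 1)) = (3 + j) + 1 := by omega
    rw [this, List.replicate_succ', List.foldl_append, ih a b d e p1 p2 p3 hp]
    simp only [List.foldl_cons, List.foldl_nil, pvBStepU]
    by_cases h79 : c = '7' ∨ c = '9'
    · simp [h79, pvK]; ring
    · simp [h79, pvK]; ring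

theorem pvRunLem (c : Char) (m : Nat) (hm : 1 ≤ m) (st : pvBState)
    (hp : st.2.1 ≠ some c) :
    ((List.replicate m c).foldl pvBStepU st).2.1 = some c ∧
    ((List.replicate m c).foldl pvBStepU st).1.2.2.2 =
      st.1.2.2.2 * pvK (decide (c = '7' ∨ c = '9')) m := by
  obtain ⟨⟨a, b, d, e⟩, ⟨p1, p2, p3⟩⟩ := st
  simp only at hp
  have hne : ¬ (some c = p1) := fun h => hp h.symm
  match m, hm with
  | 1, _ => simp [List.replicate, pvBStepU, hne, pvK]
  | 2, _ =>
    simp [List.replicate, pvBStepU, hne, pvK]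
    ring
  | (j + 3), _ =>
    have h3 : j + 3 = 3 + j := by omega
    rw [h3, pvRun3 c j a b d e p1 p2 p3 hp]
    simp [show (3:Nat) + j = j + 3 from by omega]

-- run-length structure facts
def pvFlat (rs : List (Char × Nat)) : List Char :=
  rs.flatMap (fun r => List.replicate r.2 r.1)

def pvWf : Option Char → List (Char × Nat) → Prop
  | _, [] => True
  | p, (c, n) :: rs => 1 ≤ n ∧ p ≠ some c ∧ pvWf (some c) rs

theorem pvFlat_go (l : List Char) :
    ∀ c n, pvFlat (pvGoRuns c n l) = List.replicate n c ++ l := by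
  induction l with
  | nil => intro c n; simp [pvGoRuns, pvFlat]
  | cons x xs ih =>
    intro c n
    by_cases h : x = c
    · subst h
      rw [pvGoRuns, if_pos rfl, ih, List.replicate_succ', List.append_assoc]
      simp
    · rw [pvGoRuns, if_neg h]
      simp only [pvFlat, List.flatMap_cons] at *
      rw [ih]
      simp [List.replicate]

theorem pvFlat_runs (l : List Char) : pvFlat (pvRuns l) = l := by
  cases l with
  | nil => rfl
  | cons x xs => rw [pvRuns, pvFlat_go]; simp [List.replicate]

theorem pvWf_go (l : List Char) :
    ∀ c n p, p ≠ some c → 1 ≤ n → pvWf p (pvGoRuns c n l) := by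
  induction l with
  | nil => intro c n p hp hn; exact ⟨hn, hp, trivial⟩
  | cons x xs ih =>
    intro c n p hp hn
    by_cases h : x = c
    · rw [pvGoRuns, if_pos h]; exact ih c (n + 1) p hp (by omega)
    · rw [pvGoRuns, if_neg h]
      exact ⟨hn, hp, ih x 1 (some c) (by simp; exact fun hh => h hh.symm) le_rfl⟩

theorem pvWf_runs (l : List Char) : pvWf none (pvRuns l) := by
  cases l with
  | nil => trivial
  | cons x xs => exact pvWf_go xs x 1 none (by simp) le_rfl

theorem pvFold_runs (rs : List (Char × Nat)) :
    ∀ st : pvBState, pvWf st.2.1 rs →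
      ((pvFlat rs).foldl pvBStepU st).1.2.2.2 = st.1.2.2.2 * pvProdK rs := by
  induction rs with
  | nil => intro st _; simp [pvFlat, pvProdK]
  | cons r rs ih =>
    obtain ⟨c, n⟩ := r
    intro st hwf
    obtain ⟨hn, hp, hwf'⟩ := hwf
    have hfl : pvFlat ((c, n) :: rs) = List.replicate n c ++ pvFlat rs := by
      simp [pvFlat]
    rw [hfl, List.foldl_append]
    obtain ⟨hmid1, hmid3⟩ := pvRunLem c n hn st hp
    rw [ih _ (by rw [hmid1]; exact hwf'), hmid3]
    simp [pvProdK, mul_assoc]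

-- A-side: folding (a * f r % pvMod) over a nonempty list is the reduced product
theorem pvModFold (f : Char × Nat → Int) (rs : List (Char × Nat)) :
    ∀ (a : Int) (r0 : Char × Nat),
      (r0 :: rs).foldl (fun a r => a * f r % pvMod) a =
        a * ((r0 :: rs).map f).prod % pvMod := by
  induction rs with
  | nil => intro a r0; simp
  | cons r1 rs ih =>
    intro a r0
    have : (r0 :: r1 :: rs).foldl (fun a r => a * f r % pvMod) a =
        (r1 :: rs).foldl (fun a r => a * f r % pvMod) (a * f r0 % pvMod) := by
      simp
    rw [this, ih]
    rw [Int.mul_emod, Int.emod_emod_of_dvd _ dvd_rfl, ← Int.mul_emod]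
    simp [mul_assoc]

theorem pvAlt_eq_prod (l : List Char) :
    (l.foldl pvBStep ((0, 0, 0, 1), (none, none, none))).1.2.2.2 % pvMod =
      pvProdK (pvRuns l) % pvMod := by
  have hcong := pvBcong l (0, 0, 0, 1) (0, 0, 0, 1) (none, none, none)
    ⟨rfl, rfl, rfl, rfl⟩
  obtain ⟨-, -, -, -, h3⟩ := hcong
  rw [h3]
  have := pvFold_runs (pvRuns l) ((0, 0, 0, 1), (none, none, none)) (pvWf_runs l)
  rw [pvFlat_runs] at this
  rw [this]
  simp

-- ===== VERDICT (by name: the statement is the Claim_ definition above) =====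
theorem countTexts2_spec : Claim_equal_countTexts2 := by
  intro s _
  unfold Spec_countTexts2 countTexts2 countTexts2_alt
  rw [pvAlt_eq_prod]
  have hfun : (fun (a : Int) (r : Char × Nat) => a * pvCount r.1 r.2 % pvMod) =
      (fun (a : Int) (r : Char × Nat) =>
        a * pvK (decide (r.1 = '7' ∨ r.1 = '9')) r.2 % pvMod) := by
    funext a r; rw [pvCount_eq]
  rw [hfun]
  cases h : pvRuns s.toList with
  | nil => simp [pvProdK]; decide
  | cons r0 rs =>
    rw [pvModFold]
    simp [pvProdK]
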